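-- pv_equiv track=rewrite | github.com/OceanDECRUZ/IPSA_Project | Rescuing_human_robot/In512.py | second_contour
-- ===== SOURCE A (Python) =====
-- N=20 #nombre de pixel en y
--
-- M=20 #nombre de prixel en x
--
-- def first_contour(cell):
--     L=[]
--     for i in range(-1,2):
--         for j in range(-1,2):
--             if (i!=0 or j!=0) and 0<=i+cell[0]<N and 0<=j+cell[1]<M:
--                 L.append((cell[0]+i,cell[1]+j))
--     return L
--
-- def second_contour(cell):
--     L=[]
--     fc=first_contour(cell)
--     for i in range(-2,3):
--         for j in range(-2,3):
--             if (i!=0 or j!=0) and not((i+cell[0],j+cell[1]) in fc) and 0<=i+cell[0]<N and 0<=j+cell[1]<M: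
--                     L.append((cell[0]+i,cell[1]+j))
--     return L
-- ===== SOURCE B (Python) =====
-- N = 20  # nombre de pixel en y
-- M = 20  # nombre de prixel en x
--
-- def second_contour(cell):
--     L = []
--     for i in range(-2, 3):
--         for j in range(-2, 3):
--             if max(abs(i), abs(j)) == 2 and 0 <= cell[0] + i < N and 0 <= cell[1] + j < M:
--                 L.append((cell[0] + i, cell[1] + j))
--     return L
-- ===== Notes on version B (the rewrite author's own statement) =====
-- stated objective: simpler
-- what changed: B drops the build-first_contour-then-membership-test scheme entirely and appends a cell directly when its Chebyshev offset satisfies max(abs(i),abs(j))==2 plus the bounds check, so no helper list is built or scanned.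
import Mathlib
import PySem

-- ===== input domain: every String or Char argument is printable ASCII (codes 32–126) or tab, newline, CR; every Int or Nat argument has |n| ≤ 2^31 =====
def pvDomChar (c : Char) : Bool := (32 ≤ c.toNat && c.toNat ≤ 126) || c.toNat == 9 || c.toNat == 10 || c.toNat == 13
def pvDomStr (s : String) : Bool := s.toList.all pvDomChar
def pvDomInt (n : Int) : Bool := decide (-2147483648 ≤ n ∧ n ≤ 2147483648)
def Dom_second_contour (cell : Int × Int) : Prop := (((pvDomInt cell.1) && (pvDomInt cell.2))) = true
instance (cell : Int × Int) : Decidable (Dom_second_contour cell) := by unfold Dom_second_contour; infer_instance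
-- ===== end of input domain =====

-- B replaces A's build-first-contour-then-test-membership scheme by a direct
-- Chebyshev-ring predicate max(|i|,|j|) = 2; objective: simpler (no helper list).

-- ===== PORT A =====
def first_contour (cell : Int × Int) : List (Int × Int) :=
  (PySem.List.pyRange (-1) 2 1).foldl (fun L i =>
    (PySem.List.pyRange (-1) 2 1).foldl (fun L j =>
      if (i ≠ 0 ∨ j ≠ 0) ∧ 0 ≤ i + cell.1 ∧ i + cell.1 < 20 ∧ 0 ≤ j + cell.2 ∧ j + cell.2 < 20
      then L ++ [(cell.1 + i, cell.2 + j)] else L) L) []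

def second_contour (cell : Int × Int) : List (Int × Int) :=
  let fc := first_contour cell
  (PySem.List.pyRange (-2) 3 1).foldl (fun L i =>
    (PySem.List.pyRange (-2) 3 1).foldl (fun L j =>
      if (i ≠ 0 ∨ j ≠ 0) ∧ (i + cell.1, j + cell.2) ∉ fc ∧
         0 ≤ i + cell.1 ∧ i + cell.1 < 20 ∧ 0 ≤ j + cell.2 ∧ j + cell.2 < 20
      then L ++ [(cell.1 + i, cell.2 + j)] else L) L) []

-- ===== PORT B =====
def second_contour_alt (cell : Int × Int) : List (Int × Int) :=
  (PySem.List.pyRange (-2) 3 1).foldl (fun L i =>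
    (PySem.List.pyRange (-2) 3 1).foldl (fun L j =>
      if max i.natAbs j.natAbs = 2 ∧ 0 ≤ cell.1 + i ∧ cell.1 + i < 20 ∧ 0 ≤ cell.2 + j ∧ cell.2 + j < 20
      then L ++ [(cell.1 + i, cell.2 + j)] else L) L) []

-- ===== PRECONDITION & SPEC =====
def Spec_second_contour (cell : Int × Int) (out : List (Int × Int)) : Prop := out = second_contour_alt cell
instance (cell : Int × Int) (out : List (Int × Int)) : Decidable (Spec_second_contour cell out) := by unfold Spec_second_contour; infer_instance

-- ===== CLAIM (what is proved, stated in full; the proofs are below) =====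
def Claim_equal_second_contour : Prop := ∀ (cell : Int × Int), Dom_second_contour cell → Spec_second_contour cell (second_contour cell)

-- ===== LEMMAS AND PROOFS =====

-- membership in a conditional-append inner fold
theorem pv_mem_foldl_if {α β : Type} (J : List α) (p : α → Prop) [DecidablePred p]
    (f : α → β) (L0 : List β) (x : β) :
    (x ∈ J.foldl (fun L j => if p j then L ++ [f j] else L) L0) ↔
      x ∈ L0 ∨ ∃ j ∈ J, p j ∧ x = f j := by
  induction J generalizing L0 with
  | nil => simp
  | cons a J ih =>
    simp only [List.foldl_cons, ih]
    split_ifs with h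
    · simp [h]; tauto
    · simp [h]

-- membership in the doubly nested conditional-append fold
theorem pv_mem_foldl2 {α β γ : Type} (I : List α) (J : List β) (p : α → β → Prop)
    [∀ i j, Decidable (p i j)] (f : α → β → γ) (L0 : List γ) (x : γ) :
    (x ∈ I.foldl (fun L i => J.foldl (fun L j => if p i j then L ++ [f i j] else L) L) L0) ↔
      x ∈ L0 ∨ ∃ i ∈ I, ∃ j ∈ J, p i j ∧ x = f i j := by
  induction I generalizing L0 with
  | nil => simp
  | cons a I ih =>
    simp only [List.foldl_cons, ih, pv_mem_foldl_if, List.mem_cons]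
    constructor
    · rintro ((h | ⟨j, hj, hp, hx⟩) | ⟨i, hi, j, hj, hp, hx⟩)
      · exact Or.inl h
      · exact Or.inr ⟨a, Or.inl rfl, j, hj, hp, hx⟩
      · exact Or.inr ⟨i, Or.inr hi, j, hj, hp, hx⟩
    · rintro (h | ⟨i, (rfl | hi), j, hj, hp, hx⟩)
      · exact Or.inl (Or.inl h)
      · exact Or.inl (Or.inr ⟨j, hj, hp, hx⟩)
      · exact Or.inr ⟨i, hi, j, hj, hp, hx⟩

-- two nested conditional-append folds with pointwise-equivalent conditions are equal
theorem pv_foldl_if_congr {α β : Type} (J : List α) (p q : α → Prop)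
    [DecidablePred p] [DecidablePred q] (f : α → β) (L0 : List β)
    (h : ∀ j ∈ J, p j ↔ q j) :
    J.foldl (fun L j => if p j then L ++ [f j] else L) L0 =
      J.foldl (fun L j => if q j then L ++ [f j] else L) L0 := by
  induction J generalizing L0 with
  | nil => rfl
  | cons a J ih =>
    simp only [List.foldl_cons]
    rw [if_congr (h a (by simp)) rfl rfl]
    exact ih _ (fun j hj => h j (by simp [hj]))

theorem pv_foldl2_congr {α β γ : Type} (I : List α) (J : List β) (p q : α → β → Prop)
    [∀ i j, Decidable (p i j)] [∀ i j, Decidable (q i j)] (f : α → β → γ) (L0 : List γ)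
    (h : ∀ i ∈ I, ∀ j ∈ J, p i j ↔ q i j) :
    I.foldl (fun L i => J.foldl (fun L j => if p i j then L ++ [f i j] else L) L) L0 =
      I.foldl (fun L i => J.foldl (fun L j => if q i j then L ++ [f i j] else L) L) L0 := by
  induction I generalizing L0 with
  | nil => rfl
  | cons a I ih =>
    simp only [List.foldl_cons]
    rw [pv_foldl_if_congr J (p a) (q a) _ L0 (h a (by simp))]
    exact ih _ (fun i hi => h i (by simp [hi]))

-- characterisation of first_contour membership
theorem pv_mem_fc (cell : Int × Int) (x : Int × Int) :
    x ∈ first_contour cell ↔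
      ∃ i, (-1 ≤ i ∧ i < 2) ∧ ∃ j, (-1 ≤ j ∧ j < 2) ∧
        ((i ≠ 0 ∨ j ≠ 0) ∧ 0 ≤ i + cell.1 ∧ i + cell.1 < 20 ∧ 0 ≤ j + cell.2 ∧ j + cell.2 < 20) ∧
        x = (cell.1 + i, cell.2 + j) := by
  unfold first_contour
  rw [pv_mem_foldl2]
  simp [PySem.List.mem_pyRange_one]

-- ===== VERDICT (by name: the statement is the Claim_ definition above) =====
theorem second_contour_spec : Claim_equal_second_contour := by
  intro cell _
  unfold Spec_second_contour second_contour second_contour_alt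
  apply pv_foldl2_congr
  intro i hi j hj
  rw [PySem.List.mem_pyRange_one] at hi hj
  rw [pv_mem_fc]
  constructor
  · rintro ⟨hij, hnm, hb⟩
    refine ⟨?_, by omega⟩
    by_contra hmax
    exact hnm ⟨i, by omega, j, by omega, ⟨by omega, by omega⟩, by simp [Int.add_comm]⟩
  · rintro ⟨hmax, hb⟩
    refine ⟨by omega, ?_, by omega⟩
    rintro ⟨i', hi', j', hj', _, heq⟩
    have h1 : i' = i := by
      have := congrArg Prod.fst heq; simp at this; omega
    have h2 : j' = j := by
      have := congrArg Prod.snd heq; simp at this; omega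
    omega
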